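-- pv_equiv track=rewrite | github.com/pjdrm/DocumentIdChallenge | src/service.py | segeval_converter
-- ===== SOURCE A (Python) =====
-- def segeval_converter(segmentation):
--     segeval_format = []
--     sent_count = 0
--     for sent in segmentation:
--         if sent == 1:
--             segeval_format.append(sent_count+1)
--             sent_count = 0
--         else:
--             sent_count += 1
--     segeval_format.append(sent_count)
--     return segeval_format
-- ===== SOURCE B (Python) =====
-- def segeval_converter(segmentation):
--     idxs = [i for i, x in enumerate(segmentation) if x == 1]
--     out = []
--     prev = -1
--     for i in idxs:
--         out.append(i - prev)
--         prev = i
--     out.append(len(segmentation) - 1 - prev)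
--     return out
-- ===== Notes on version B (the rewrite author's own statement) =====
-- stated objective: alternative
-- what changed: Replaces A's single counting pass (running sent_count reset at each 1) with building the list of boundary indices first and then emitting consecutive-index differences with a running previous index, plus one unconditional trailing append.
import Mathlib
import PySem

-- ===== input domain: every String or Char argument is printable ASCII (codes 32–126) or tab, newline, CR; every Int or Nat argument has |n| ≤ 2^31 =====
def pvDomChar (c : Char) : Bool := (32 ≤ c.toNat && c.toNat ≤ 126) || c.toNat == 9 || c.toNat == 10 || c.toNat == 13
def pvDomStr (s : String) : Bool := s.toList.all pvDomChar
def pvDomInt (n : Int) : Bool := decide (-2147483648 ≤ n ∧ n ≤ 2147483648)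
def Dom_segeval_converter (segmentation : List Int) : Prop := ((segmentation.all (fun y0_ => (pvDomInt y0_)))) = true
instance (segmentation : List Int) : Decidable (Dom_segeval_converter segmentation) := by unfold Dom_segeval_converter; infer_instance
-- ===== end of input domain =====

-- B builds the boundary-index table first and emits index differences; same O(n), alternative decomposition.

-- ===== PORT A =====
def segeval_converter (segmentation : List Int) : List Int :=
  let st := segmentation.foldl
    (fun (s : List Int × Int) sent =>
      if sent = 1 then (s.1 ++ [s.2 + 1], 0) else (s.1, s.2 + 1))
    ([], 0)
  st.1 ++ [st.2]

-- ===== PORT B =====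
def segeval_converter_alt (segmentation : List Int) : List Int :=
  let idxs : List Int :=
    ((PySem.List.enumerate segmentation).filter (fun p => p.2 == 1)).map (fun p => p.1)
  let st := idxs.foldl
    (fun (s : List Int × Int) i => (s.1 ++ [i - s.2], i)) ([], -1)
  st.1 ++ [(segmentation.length : Int) - 1 - st.2]

-- ===== PRECONDITION & SPEC =====
def Spec_segeval_converter (segmentation : List Int) (out : List Int) : Prop := out = segeval_converter_alt segmentation
instance (segmentation : List Int) (out : List Int) : Decidable (Spec_segeval_converter segmentation out) := by unfold Spec_segeval_converter; infer_instance

-- ===== CLAIM (what is proved, stated in full; the proofs are below) =====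
def Claim_equal_segeval_converter : Prop := ∀ (segmentation : List Int), Dom_segeval_converter segmentation → Spec_segeval_converter segmentation (segeval_converter segmentation)

-- ===== LEMMAS AND PROOFS =====

-- Invariant linking A's running count to B's previous boundary index:
-- starting at enumeration offset k with A-count (k-1-prev), the two folds
-- produce the same output list, and A's final count is (k+len-1-prevB).
theorem segeval_inv (seg : List Int) : ∀ (k : Int) (acc : List Int) (prev : Int),
    seg.foldl
      (fun (s : List Int × Int) sent =>
        if sent = 1 then (s.1 ++ [s.2 + 1], 0) else (s.1, s.2 + 1))
      (acc, k - 1 - prev)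
    =
    (let st := (((PySem.List.enumerate seg k).filter (fun p => p.2 == 1)).map (fun p => p.1)).foldl
        (fun (s : List Int × Int) i => (s.1 ++ [i - s.2], i)) (acc, prev);
     (st.1, k + (seg.length : Int) - 1 - st.2)) := by
  induction seg with
  | nil => intro k acc prev; simp [PySem.List.enumerate]
  | cons x xs ih =>
    intro k acc prev
    rw [PySem.List.enumerate_cons]
    by_cases hx : x = 1
    · subst hx
      simp only [List.foldl_cons, List.filter_cons]
      norm_num
      have h1 : k - 1 - prev + 1 = k - prev := by ring
      rw [h1]
      have h2 : (0 : Int) = (k + 1) - 1 - k := by ring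
      conv_lhs => rw [show (List.foldl (fun (s : List Int × Int) sent =>
          if sent = 1 then (s.1 ++ [s.2 + 1], 0) else (s.1, s.2 + 1)) (acc ++ [k - prev], (0:Int)) xs)
        = (List.foldl (fun (s : List Int × Int) sent =>
          if sent = 1 then (s.1 ++ [s.2 + 1], 0) else (s.1, s.2 + 1)) (acc ++ [k - prev], (k+1) - 1 - k) xs)
        from by rw [← h2]]
      rw [ih (k+1) (acc ++ [k - prev]) k]
      simp; ring
    · simp only [List.foldl_cons, List.filter_cons]
      have hx' : (x == 1) = false := by simp [hx]
      simp only [hx', if_neg hx]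
      have h1 : k - 1 - prev + 1 = (k + 1) - 1 - prev := by ring
      rw [h1, ih (k+1) acc prev]
      simp; ring

-- ===== VERDICT (by name: the statement is the Claim_ definition above) =====
theorem segeval_converter_spec : Claim_equal_segeval_converter := by
  intro seg _
  unfold Spec_segeval_converter segeval_converter segeval_converter_alt
  have h := segeval_inv seg 0 [] (-1)
  norm_num at h
  rw [h]
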